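-- pv_equiv track=rewrite | github.com/AldoEZ/CPCFI | Sexta_Generacion_CPCFI/propedeutico/contest_2/E_Two_Gram.py | solve
-- ===== SOURCE A (Python) =====
-- def solve(n, s):
--     aux = ""
--     max = 0
--     resp = ""
--     for i in range(0, len(s)-1):
--         aux = s[i]+s[i+1]
--         u = conicidencias(aux, s)
--         if max < u:
--             max = u
--             resp = aux
--     return resp
--
-- def conicidencias(aux, s):
--     cont = 0
--     for i in range(0, len(s)-1):
--         if s[i]+s[i+1] == aux:
--             cont += 1
--     return cont
-- ===== SOURCE B (Python) =====
-- def solve(n, s):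
--     counts = {}
--     for i in range(len(s) - 1):
--         g = s[i:i+2]
--         counts[g] = counts.get(g, 0) + 1
--     best = ""
--     best_count = 0
--     for g, c in counts.items():
--         if best_count < c:
--             best_count = c
--             best = g
--     return best
-- ===== Notes on version B (the rewrite author's own statement) =====
-- stated objective: faster
-- what changed: Replaced the quadratic rescan (recounting each 2-gram over the whole string at every position) by one counting pass into a dict followed by a scan over the dict items in first-occurrence order with a strict-> update, which preserves A's earliest-on-ties choice.
import Mathlib
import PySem

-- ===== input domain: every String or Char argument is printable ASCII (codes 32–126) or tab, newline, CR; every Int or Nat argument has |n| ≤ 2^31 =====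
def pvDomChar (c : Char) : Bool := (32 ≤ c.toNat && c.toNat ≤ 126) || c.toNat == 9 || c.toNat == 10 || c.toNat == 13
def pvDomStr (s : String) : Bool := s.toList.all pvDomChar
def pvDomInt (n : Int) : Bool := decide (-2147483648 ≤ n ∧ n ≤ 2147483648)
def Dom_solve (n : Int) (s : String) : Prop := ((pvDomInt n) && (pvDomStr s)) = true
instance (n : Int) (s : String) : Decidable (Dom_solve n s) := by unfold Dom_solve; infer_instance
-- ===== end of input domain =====

-- B replaces A's quadratic per-position rescan by one counting pass into a dict plus a scan
-- over its items (first-occurrence order, strict >), keeping A's earliest-on-ties result.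

-- ===== PORT A =====
-- conicidencias(aux, s): count positions i with s[i]+s[i+1] == aux
def conicidencias (aux : List Char) (L : List Char) : Int :=
  (PySem.List.pyRange 0 ((L.length : Int) - 1)).foldl
    (fun cont i =>
      if [PySem.List.pyGetD L i ' ', PySem.List.pyGetD L (i + 1) ' '] == aux then cont + 1
      else cont) 0

def solve (n : Int) (s : String) : String :=
  let L := s.toList
  let st := (PySem.List.pyRange 0 ((L.length : Int) - 1)).foldl
    (fun (st : Int × List Char) i =>
      let aux := [PySem.List.pyGetD L i ' ', PySem.List.pyGetD L (i + 1) ' ']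
      let u := conicidencias aux L
      if st.1 < u then (u, aux) else st) (0, [])
  String.mk st.2

-- ===== PORT B =====
def solve_alt (n : Int) (s : String) : String :=
  let L := s.toList
  let counts := (PySem.List.pyRange 0 ((L.length : Int) - 1)).foldl
    (fun (d : PySem.Dict (List Char) Int) i =>
      let g := PySem.List.slice L (some i) (some (i + 2))
      d.insert g (d.getD g 0 + 1)) PySem.Dict.empty
  let st := counts.items.foldl
    (fun (st : Int × List Char) p => if st.1 < p.2 then (p.2, p.1) else st) (0, [])
  String.mk st.2

-- ===== PRECONDITION & SPEC =====
def Spec_solve (n : Int) (s : String) (out : String) : Prop := out = solve_alt n s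
instance (n : Int) (s : String) (out : String) : Decidable (Spec_solve n s out) := by unfold Spec_solve; infer_instance

-- ===== CLAIM (what is proved, stated in full; the proofs are below) =====
def Claim_equal_solve : Prop := ∀ (n : Int) (s : String), Dom_solve n s → Spec_solve n s (solve n s)

-- ===== LEMMAS AND PROOFS =====

-- the list of 2-grams of L, as lists of chars
def grams (L : List Char) : List (List Char) :=
  (List.range (L.length - 1)).map (fun i => [L.getD i ' ', L.getD (i + 1) ' '])

-- the selection step both programs use, with c the (fixed) count function
def sel (c : List Char → Int) (st : Int × List Char) (x : List Char) : Int × List Char :=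
  if st.1 < c x then (c x, x) else st

lemma sel_fst_le (c : List Char → Int) (st : Int × List Char) (x : List Char) :
    st.1 ≤ (sel c st x).1 := by
  unfold sel; split_ifs with h
  · exact le_of_lt h
  · exact le_refl _

lemma le_sel_fst (c : List Char → Int) (st : Int × List Char) (x : List Char) :
    c x ≤ (sel c st x).1 := by
  unfold sel; split_ifs with h
  · exact le_refl _
  · omega

-- folding Set.add from any accumulator appends some suffix
lemma foldl_add_append {α : Type} [BEq α] (xs : List α) (acc : PySem.Set α) :
    ∃ rest, List.foldl PySem.Set.add acc xs = acc ++ rest := by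
  induction xs generalizing acc with
  | nil => exact ⟨[], by simp⟩
  | cons x xs ih =>
    simp only [List.foldl_cons]
    rcases ih (PySem.Set.add acc x) with ⟨rest, hrest⟩
    unfold PySem.Set.add at hrest ⊢
    split_ifs at hrest ⊢ with h
    · exact ⟨rest, hrest⟩
    · exact ⟨x :: rest, by simpa using hrest⟩

-- core: folding sel over a list equals folding sel over its fresh (not-yet-seen) dedup part
lemma sel_foldl_dedup (c : List Char → Int) :
    ∀ (xs : List (List Char)) (seen : PySem.Set (List Char)) (st : Int × List Char),
    (∀ x ∈ seen, c x ≤ st.1) →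
    List.foldl (sel c) st ((List.foldl PySem.Set.add seen xs).drop seen.length)
      = List.foldl (sel c) st xs := by
  intro xs
  induction xs with
  | nil => intro seen st _; simp
  | cons x xs ih =>
    intro seen st h
    simp only [List.foldl_cons]
    by_cases hx : seen.contains x = true
    · have hxm : x ∈ seen := by
        simpa [PySem.Set.contains, List.contains_iff_mem] using hx
      have hsel : sel c st x = st := by
        unfold sel; have := h x hxm; split_ifs with hlt
        · omega
        · rfl
      have hadd : PySem.Set.add seen x = seen := by
        unfold PySem.Set.add; rw [if_pos hx]
      rw [hadd, hsel]
      exact ih seen st h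
    · have hadd : PySem.Set.add seen x = seen ++ [x] := by
        unfold PySem.Set.add; rw [if_neg hx]
      rw [hadd]
      have h' : ∀ y ∈ seen ++ [x], c y ≤ (sel c st x).1 := by
        intro y hy
        rcases List.mem_append.mp hy with hy | hy
        · exact le_trans (h y hy) (sel_fst_le c st x)
        · rw [List.mem_singleton] at hy; rw [hy]; exact le_sel_fst c st x
      have := ih (seen ++ [x]) (sel c st x) h'
      rcases foldl_add_append xs (seen ++ [x]) with ⟨rest, hrest⟩
      rw [hrest] at this ⊢
      have hdrop1 : ((seen ++ [x]) ++ rest).drop (seen ++ [x]).length = rest := by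
        simp
      have hdrop2 : ((seen ++ [x]) ++ rest).drop seen.length = x :: rest := by
        rw [List.append_assoc]
        rw [List.drop_append_of_le_length (by simp)]
        simp
      rw [hdrop2]
      simp only [List.foldl_cons]
      rw [← this, hdrop1]

-- conicidencias counts occurrences in grams
lemma conicidencias_eq (aux : List Char) (L : List Char) (hL : L ≠ []) :
    conicidencias aux L = ((grams L).count aux : Int) := by
  unfold conicidencias grams
  have hm : ((L.length : Int) - 1) = ((L.length - 1 : Nat) : Int) := by
    have : 1 ≤ L.length := List.length_pos_iff.mpr hL
    omega
  rw [hm, PySem.List.pyRange_zero_natCast, List.foldl_map]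
  have : ∀ (a : Int) (k : Nat),
      (if [PySem.List.pyGetD L (k : Int) ' ', PySem.List.pyGetD L ((k : Int) + 1) ' '] == aux
       then a + 1 else a)
      = (if (fun i => [L.getD i ' ', L.getD (i + 1) ' ']) k == aux then a + 1 else a) := by
    intro a k
    have h1 : PySem.List.pyGetD L (k : Int) ' ' = L.getD k ' ' := PySem.List.pyGetD_natCast L k ' '
    have h2 : PySem.List.pyGetD L ((k : Int) + 1) ' ' = L.getD (k + 1) ' ' := by
      have := PySem.List.pyGetD_natCast L (k + 1) ' '
      push_cast at this
      exact this
    simp [h1, h2]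
  simp only [this]
  rw [PySem.List.foldl_count_if]
  simp only [List.count, List.countP_map, zero_add]
  congr 1

-- slice L i (i+2) is the i-th 2-gram when i + 1 < L.length
lemma slice_two (L : List Char) (i : Nat) (hi : i + 1 < L.length) :
    PySem.List.slice L (some (i : Int)) (some ((i : Int) + 2)) = [L.getD i ' ', L.getD (i + 1) ' '] := by
  have h2 : ((i : Int) + 2) = ((i + 2 : Nat) : Int) := by push_cast; ring
  rw [h2, PySem.List.slice_natCast]
  have h3 : i + 2 - i = 2 := by omega
  rw [h3]
  have hdrop : L.drop i = L[i] :: L.drop (i + 1) := List.drop_eq_getElem_cons (by omega)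
  have hdrop' : L.drop (i + 1) = L[i+1] :: L.drop (i + 2) := List.drop_eq_getElem_cons (by omega)
  have hg1 : L.getD i ' ' = L[i] := List.getD_eq_getElem L ' ' (by omega)
  have hg2 : L.getD (i + 1) ' ' = L[i + 1] := List.getD_eq_getElem L ' ' (by omega)
  rw [hg1, hg2, hdrop, hdrop']
  rfl

-- ===== VERDICT (by name: the statement is the Claim_ definition above) =====
theorem solve_spec : Claim_equal_solve := by
  intro n s _
  unfold Spec_solve solve solve_alt
  by_cases hL : s.toList = []
  · simp [hL]
    rfl
  · set L := s.toList with hLdef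
    have hlen : 1 ≤ L.length := List.length_pos_iff.mpr hL
    have hm : ((L.length : Int) - 1) = ((L.length - 1 : Nat) : Int) := by omega
    simp only [hm, PySem.List.pyRange_zero_natCast, List.foldl_map]
    set G := grams L with hG
    set c : List Char → Int := fun x => ((G.count x : Nat) : Int) with hc
    -- A side: the position fold is the sel-fold over the 2-gram list
    rw [PySem.List.foldl_congr_mem (List.range (L.length - 1)) _
      (fun st i => sel c st [L.getD i ' ', L.getD (i + 1) ' ']) ((0 : Int), ([] : List Char))
      (by
        intro acc i _
        have h1 : PySem.List.pyGetD L (i : Int) ' ' = L.getD i ' ' := PySem.List.pyGetD_natCast L i ' '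
        have h2 : PySem.List.pyGetD L ((i : Int) + 1) ' ' = L.getD (i + 1) ' ' := by
          have := PySem.List.pyGetD_natCast L (i + 1) ' '
          push_cast at this
          exact this
        simp only [h1, h2, sel, hc]
        rw [conicidencias_eq _ L hL, ← hG])]
    -- B side: the counting fold builds counter G
    rw [PySem.List.foldl_congr_mem (List.range (L.length - 1)) _
      (fun (d : PySem.Dict (List Char) Int) i =>
        d.insert [L.getD i ' ', L.getD (i + 1) ' '] (d.getD [L.getD i ' ', L.getD (i + 1) ' '] 0 + 1))
      PySem.Dict.empty
      (by
        intro d i hi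
        rw [List.mem_range] at hi
        have : i + 1 < L.length := by omega
        simp only [slice_two L i this])]
    have hAfold : List.foldl (fun st i => sel c st [L.getD i ' ', L.getD (i + 1) ' '])
        ((0 : Int), ([] : List Char)) (List.range (L.length - 1))
        = List.foldl (sel c) ((0 : Int), ([] : List Char)) G := by
      rw [hG]; unfold grams; rw [List.foldl_map]
    have hBfold : List.foldl (fun (d : PySem.Dict (List Char) Int) i =>
        d.insert [L.getD i ' ', L.getD (i + 1) ' '] (d.getD [L.getD i ' ', L.getD (i + 1) ' '] 0 + 1))
        PySem.Dict.empty (List.range (L.length - 1))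
        = PySem.Dict.counter G := by
      rw [hG]; unfold grams
      rw [← PySem.Dict.foldl_insert_getD_add_one_eq_counter, List.foldl_map]
    rw [hAfold, hBfold, PySem.Dict.items_counter, List.foldl_map]
    -- the items fold is the sel-fold over the deduplicated gram list
    have hsel : List.foldl
        (fun (st : Int × List Char) k => if st.1 < ((G.count k : Nat) : Int) then (((G.count k : Nat) : Int), k) else st)
        ((0 : Int), ([] : List Char)) (PySem.Set.ofList G)
        = List.foldl (sel c) ((0 : Int), ([] : List Char)) (PySem.Set.ofList G) := rfl
    rw [hsel]
    have hdedup := sel_foldl_dedup c G PySem.Set.empty ((0 : Int), ([] : List Char))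
      (by intro x hx; simp [PySem.Set.empty] at hx)
    simp only [PySem.Set.empty, List.length_nil, List.drop_zero] at hdedup
    have hofList : PySem.Set.ofList G = List.foldl PySem.Set.add [] G := rfl
    rw [hofList, hdedup]
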